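-- pv_equiv track=rewrite | github.com/bonaarhousell/mull-journeeyy | grade_checker.py | grade_cek
-- ===== SOURCE A (Python) =====
-- def grade_cek(number):
--     if not number:
--         return {}
--
--     grades = {}
--
--     for num in number:
--         if num > 89:
--             grade = "A"
--         elif num > 79 and num <= 89:
--             grade = "B"
--         elif num > 69 and num <= 79:
--             grade = "C"
--         elif num > 59 and num <= 69:
--             grade = "D"
--         else:
--             grade = "F"
--
--         if grade in grades:
--             grades[grade] += 1
--         else:
--             grades[grade] = 1
--
--     return grades
-- ===== SOURCE B (Python) =====
-- def grade_cek(number):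
--     # staged: classify arithmetically, dedupe in first-seen order, then count per key
--     grades = ["F", "D", "C", "B", "A"]
--     letters = [grades[min(4, max(0, (num - 50) // 10))] for num in number]
--     order = []
--     for g in letters:
--         if g not in order:
--             order.append(g)
--     return {g: letters.count(g) for g in order}
-- ===== Notes on version B (the rewrite author's own statement) =====
-- stated objective: alternative
-- what changed: Replaces A's single pass that classifies via a five-way if/elif cascade and increments a dict by a staged pipeline: arithmetic table lookup grades[min(4,max(0,(num-50)//10))] maps scores to letters, an ordered dedup collects the distinct letters in first-seen order, and a dict comprehension pairs each with letters.count(g).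
import Mathlib
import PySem

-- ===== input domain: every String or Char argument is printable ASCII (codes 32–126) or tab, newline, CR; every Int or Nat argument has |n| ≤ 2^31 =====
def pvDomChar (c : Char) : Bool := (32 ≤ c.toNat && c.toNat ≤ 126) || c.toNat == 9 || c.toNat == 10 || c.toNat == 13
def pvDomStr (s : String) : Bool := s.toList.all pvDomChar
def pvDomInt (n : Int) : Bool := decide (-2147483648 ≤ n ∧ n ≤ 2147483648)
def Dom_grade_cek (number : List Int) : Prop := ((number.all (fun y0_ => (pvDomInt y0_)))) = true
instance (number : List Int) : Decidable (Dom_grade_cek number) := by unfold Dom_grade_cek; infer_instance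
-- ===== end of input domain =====

-- B replaces A's classify-and-increment single pass by staged passes: arithmetic table
-- lookup to letters, ordered dedup, then count per distinct letter (alternative; same result).

-- ===== PORT A =====
-- loop body of A: classify by the if/elif chain, then branch on membership
def gradeStepA (grades : PySem.Dict String Int) (num : Int) : PySem.Dict String Int :=
  let grade :=
    if num > 89 then "A"
    else if num > 79 ∧ num ≤ 89 then "B"
    else if num > 69 ∧ num ≤ 79 then "C"
    else if num > 59 ∧ num ≤ 69 then "D"
    else "F"
  if grades.contains grade then grades.insert grade (grades.getD grade 0 + 1)
  else grades.insert grade 1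

def grade_cek (number : List Int) : List (String × Int) :=
  if number = [] then []
  else (number.foldl gradeStepA PySem.Dict.empty).items

-- ===== PORT B =====
-- grades[min(4, max(0, (num - 50) // 10))]; the index is always in [0,4], so the default is unreachable
def letterB (num : Int) : String :=
  PySem.List.pyGetD ["F", "D", "C", "B", "A"]
    (min 4 (max 0 (PySem.Int.floordiv (num - 50) 10))) "F"

def grade_cek_alt (number : List Int) : List (String × Int) :=
  let letters := number.map letterB
  let order := letters.foldl (fun acc g => if acc.contains g then acc else acc ++ [g]) []
  (order.foldl (fun d g => d.insert g ((letters.count g : Int))) PySem.Dict.empty).items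

-- ===== PRECONDITION & SPEC =====
def Spec_grade_cek (number : List Int) (out : List (String × Int)) : Prop := out = grade_cek_alt number
instance (number : List Int) (out : List (String × Int)) : Decidable (Spec_grade_cek number out) := by unfold Spec_grade_cek; infer_instance

-- ===== CLAIM (what is proved, stated in full; the proofs are below) =====
def Claim_equal_grade_cek : Prop := ∀ (number : List Int), Dom_grade_cek number → Spec_grade_cek number (grade_cek number)

-- ===== LEMMAS AND PROOFS =====

-- A's cascade and B's clamped floor-division index pick the same letter
lemma letter_eq (num : Int) :
    (if num > 89 then "A"
     else if num > 79 ∧ num ≤ 89 then "B"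
     else if num > 69 ∧ num ≤ 79 then "C"
     else if num > 59 ∧ num ≤ 69 then "D"
     else "F") = letterB num := by
  unfold letterB
  split_ifs with h1 h2 h3 h4 <;>
  · first
    | (have hd : min 4 (max 0 (PySem.Int.floordiv (num - 50) 10)) = 4 := by
        have := (PySem.Int.le_floordiv_iff_mul_le (a := num - 50) (b := 10) (q := 4)
          (by norm_num)).mpr (by omega)
        omega
       rw [hd]; rfl)
    | (have hd : PySem.Int.floordiv (num - 50) 10 = 3 := by
        rw [PySem.Int.floordiv_eq_iff_of_pos (by norm_num)]; omega
       rw [hd]; rfl)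
    | (have hd : PySem.Int.floordiv (num - 50) 10 = 2 := by
        rw [PySem.Int.floordiv_eq_iff_of_pos (by norm_num)]; omega
       rw [hd]; rfl)
    | (have hd : PySem.Int.floordiv (num - 50) 10 = 1 := by
        rw [PySem.Int.floordiv_eq_iff_of_pos (by norm_num)]; omega
       rw [hd]; rfl)
    | (have hd : min 4 (max 0 (PySem.Int.floordiv (num - 50) 10)) = 0 := by
        have := (PySem.Int.floordiv_lt_iff_lt_mul (a := num - 50) (b := 10) (q := 1)
          (by norm_num)).mpr (by omega)
        omega
       rw [hd]; rfl)

-- A's loop body is one counter step at B's letter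
lemma stepA_eq (d : PySem.Dict String Int) (num : Int) :
    gradeStepA d num = d.insert (letterB num) (d.getD (letterB num) 0 + 1) := by
  unfold gradeStepA
  rw [letter_eq]
  by_cases hc : d.contains (letterB num) = true
  · rw [if_pos hc]
  · rw [if_neg hc, PySem.Dict.getD_of_not_contains d 0 (by simpa using hc)]
    norm_num

-- ===== VERDICT (by name: the statement is the Claim_ definition above) =====
theorem grade_cek_spec : Claim_equal_grade_cek := by
  intro number _
  show grade_cek number = grade_cek_alt number
  unfold grade_cek grade_cek_alt
  have hA : number.foldl gradeStepA PySem.Dict.empty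
      = PySem.Dict.counter (number.map letterB) := by
    rw [← PySem.Dict.foldl_insert_getD_add_one_eq_counter, List.foldl_map]
    exact PySem.List.foldl_congr_mem _ _ _ _ (fun d num _ => stepA_eq d num)
  have horder : (number.map letterB).foldl
      (fun acc g => if acc.contains g then acc else acc ++ [g]) []
      = PySem.Set.ofList (number.map letterB) := by
    rw [PySem.Set.ofList_eq_foldl]; rfl
  have hB : ((((number.map letterB).foldl
        (fun acc g => if acc.contains g then acc else acc ++ [g]) []).foldl
        (fun d g => d.insert g (((number.map letterB).count g : Int)))
        PySem.Dict.empty).items)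
      = (PySem.Set.ofList (number.map letterB)).map
          (fun k => (k, ((number.map letterB).count k : Int))) := by
    rw [horder,
      PySem.Dict.items_foldl_insert_fresh
        (PySem.Set.ofList (number.map letterB)) (fun g => g)
        (fun g => ((number.map letterB).count g : Int)) PySem.Dict.empty
        (fun a _ => PySem.Dict.contains_empty a)
        (by simpa using PySem.Set.nodup_ofList (number.map letterB))]
    rfl
  split_ifs with h
  · subst h; rfl
  · rw [hA, PySem.Dict.items_counter, hB]
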